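-- pv_equiv track=rewrite | github.com/cpflat/LogCausalAnalysis | logcausality/dtutil.py | limit_dt_seq
-- ===== SOURCE A (Python) =====
-- def limit_dt_seq(l_dt, top_dt, end_dt):
--     """List[dt]: Get a sequence of dt that satisfy top_dt <= dt < end_dt."""
--     if len(l_dt) == 0:
--         return
--
--     ret = []
--     l_dt = l_dt[:]
--     dt = l_dt.pop(0)
--     # pass dts before top_dt
--     while dt < top_dt:
--         if len(l_dt) == 0:
--             return []
--         else:
--             dt = l_dt.pop(0)
--
--     while dt < end_dt:
--         ret.append(dt)
--         if len(l_dt) == 0: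
--             break
--         else:
--             dt = l_dt.pop(0)
--     return ret
-- ===== SOURCE B (Python) =====
-- def limit_dt_seq(l_dt, top_dt, end_dt):
--     """List[dt]: Get a sequence of dt that satisfy top_dt <= dt < end_dt."""
--     n = len(l_dt)
--     start = next((i for i, dt in enumerate(l_dt) if dt >= top_dt), n)
--     if start == n:
--         return []
--     tail = l_dt[start:]
--     k = next((j for j, dt in enumerate(tail) if dt >= end_dt), len(tail))
--     return tail[:k]
-- ===== Notes on version B (the rewrite author's own statement) =====
-- stated objective: faster
-- what changed: Replace A's destructive pop(0)-driven while loops with a single index search (first element >= top_dt, then first later element >= end_dt) and one slice, with no list mutation.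
-- outside the precondition, e.g. on limit_dt_seq([], 0, 0): A returns None, B returns []
import Mathlib
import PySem

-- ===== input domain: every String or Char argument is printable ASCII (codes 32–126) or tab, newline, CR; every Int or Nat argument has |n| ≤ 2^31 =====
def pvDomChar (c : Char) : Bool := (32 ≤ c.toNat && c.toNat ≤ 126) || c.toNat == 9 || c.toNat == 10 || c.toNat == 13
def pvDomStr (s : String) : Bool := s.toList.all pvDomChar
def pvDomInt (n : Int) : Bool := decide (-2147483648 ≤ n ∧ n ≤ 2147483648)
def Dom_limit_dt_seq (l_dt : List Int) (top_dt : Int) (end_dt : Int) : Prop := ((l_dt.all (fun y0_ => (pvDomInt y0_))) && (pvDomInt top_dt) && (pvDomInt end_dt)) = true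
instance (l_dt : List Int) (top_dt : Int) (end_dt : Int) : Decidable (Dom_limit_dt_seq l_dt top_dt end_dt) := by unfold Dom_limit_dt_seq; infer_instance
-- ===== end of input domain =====

-- B replaces A's O(n^2) pop(0)-driven while loops with a single O(n) index search plus one slice (no mutation).
-- Pre_ excludes only the empty list, on which A returns None (not a list) while B returns [].


-- ===== PORT A =====
-- second while loop: while dt < end_dt: ret.append(dt); pop next or break
def limit_dt_seq_take (end_dt : Int) (dt : Int) (rest : List Int) (ret : List Int) : List Int :=
  if dt < end_dt then
    match rest with
    | [] => ret ++ [dt]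
    | d :: r => limit_dt_seq_take end_dt d r (ret ++ [dt])
  else ret

-- first while loop: while dt < top_dt: pop next or return []
def limit_dt_seq_skip (top_dt end_dt : Int) (dt : Int) (rest : List Int) : Option (List Int) :=
  if dt < top_dt then
    match rest with
    | [] => some []
    | d :: r => limit_dt_seq_skip top_dt end_dt d r
  else some (limit_dt_seq_take end_dt dt rest [])

def limit_dt_seq (l_dt : List Int) (top_dt : Int) (end_dt : Int) : Option (List Int) :=
  match l_dt with
  | [] => none                         -- bare `return` = None
  | dt :: rest => limit_dt_seq_skip top_dt end_dt dt rest

-- ===== PORT B =====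
-- start = first index with dt >= top_dt (else n); tail = l_dt[start:]; k = first index of tail with dt >= end_dt (else len(tail)); tail[:k]
-- the slices l_dt[start:] and tail[:k] are exact as drop/take since 0 ≤ start ≤ n and 0 ≤ k ≤ len(tail)
def limit_dt_seq_alt (l_dt : List Int) (top_dt : Int) (end_dt : Int) : Option (List Int) :=
  let n := l_dt.length
  let start := (l_dt.findIdx? (fun dt => decide (top_dt ≤ dt))).getD n
  if start = n then some []
  else
    let tail := l_dt.drop start
    let k := (tail.findIdx? (fun dt => decide (end_dt ≤ dt))).getD tail.length
    some (tail.take k)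

-- ===== PRECONDITION & SPEC =====
-- Pre_ excludes the empty list, on which A returns None (no value of the declared list type); B returns [].
def Pre_limit_dt_seq (l_dt : List Int) (top_dt : Int) (end_dt : Int) : Prop := l_dt ≠ []
instance (l_dt : List Int) (top_dt : Int) (end_dt : Int) : Decidable (Pre_limit_dt_seq l_dt top_dt end_dt) := by unfold Pre_limit_dt_seq; infer_instance
def pvWitness_limit_dt_seq : List Int × Int × Int := ([1, 3, 5], 2, 5)

def Spec_limit_dt_seq (l_dt : List Int) (top_dt : Int) (end_dt : Int) (out : Option (List Int)) : Prop := out = limit_dt_seq_alt l_dt top_dt end_dt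
instance (l_dt : List Int) (top_dt : Int) (end_dt : Int) (out : Option (List Int)) : Decidable (Spec_limit_dt_seq l_dt top_dt end_dt out) := by unfold Spec_limit_dt_seq; infer_instance

-- ===== CLAIM (what is proved, stated in full; the proofs are below) =====
def Claim_equal_limit_dt_seq : Prop := ∀ (l_dt : List Int) (top_dt : Int) (end_dt : Int), Dom_limit_dt_seq l_dt top_dt end_dt → Pre_limit_dt_seq l_dt top_dt end_dt → Spec_limit_dt_seq l_dt top_dt end_dt (limit_dt_seq l_dt top_dt end_dt)

-- ===== LEMMAS AND PROOFS =====

-- generic: take up to the first index where q holds = takeWhile (!q)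
theorem take_findIdx?_getD {α : Type} (q : α → Bool) (l : List α) :
    l.take ((l.findIdx? q).getD l.length) = l.takeWhile (fun x => !q x) := by
  induction l with
  | nil => simp
  | cons a t ih =>
    by_cases h : q a = true
    · simp [List.findIdx?_cons, h]
    · have h' : q a = false := by simpa using h
      simp only [List.findIdx?_cons, h', List.takeWhile_cons, Bool.not_eq_true',
        List.length_cons]
      cases hf : t.findIdx? q with
      | none => simpa [List.take_succ_cons, hf] using congrArg (a :: ·) (by simpa [hf] using ih)
      | some k => simpa [List.take_succ_cons, hf] using congrArg (a :: ·) (by simpa [hf] using ih)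

-- generic: drop up to the first index where q holds = dropWhile (!q)
theorem drop_findIdx?_getD {α : Type} (q : α → Bool) (l : List α) :
    l.drop ((l.findIdx? q).getD l.length) = l.dropWhile (fun x => !q x) := by
  induction l with
  | nil => simp
  | cons a t ih =>
    by_cases h : q a = true
    · simp [List.findIdx?_cons, h]
    · have h' : q a = false := by simpa using h
      simp only [List.findIdx?_cons, h', List.dropWhile_cons, Bool.not_eq_true',
        List.length_cons]
      cases hf : t.findIdx? q with
      | none => simpa [hf] using (by simpa [hf] using ih)
      | some k => simpa [hf] using (by simpa [hf] using ih)

theorem not_le_decide (c : Int) : (fun x : Int => !decide (c ≤ x)) = (fun x : Int => decide (x < c)) := by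
  funext x; by_cases h : c ≤ x <;> simp [h, not_le.mp]

-- B computes takeWhile (< end_dt) (dropWhile (< top_dt) l) on every list
theorem alt_eq_canon (l : List Int) (top_dt end_dt : Int) :
    limit_dt_seq_alt l top_dt end_dt =
      some ((l.dropWhile (fun x => decide (x < top_dt))).takeWhile (fun x => decide (x < end_dt))) := by
  unfold limit_dt_seq_alt
  have hdrop : l.drop ((l.findIdx? (fun dt => decide (top_dt ≤ dt))).getD l.length)
      = l.dropWhile (fun x => decide (x < top_dt)) := by
    rw [drop_findIdx?_getD, not_le_decide]
  by_cases hs : (l.findIdx? (fun dt => decide (top_dt ≤ dt))).getD l.length = l.length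
  · rw [if_pos hs]
    have : l.dropWhile (fun x => decide (x < top_dt)) = [] := by
      rw [← hdrop, hs, List.drop_length]
    simp [this]
  · simp only [if_neg hs]
    rw [hdrop, take_findIdx?_getD, not_le_decide]

-- A's collect loop is takeWhile
theorem take_eq (end_dt : Int) (dt : Int) (rest ret : List Int) :
    limit_dt_seq_take end_dt dt rest ret = ret ++ (dt :: rest).takeWhile (fun x => decide (x < end_dt)) := by
  induction rest generalizing dt ret with
  | nil =>
    unfold limit_dt_seq_take
    by_cases h : dt < end_dt <;> simp [h]
  | cons d r ih =>
    unfold limit_dt_seq_take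
    by_cases h : dt < end_dt
    · simp only [if_pos h]
      rw [ih]
      simp [h]
    · simp [h]

-- A's skip loop followed by the collect loop is takeWhile ∘ dropWhile
theorem skip_eq (top_dt end_dt : Int) (dt : Int) (rest : List Int) :
    limit_dt_seq_skip top_dt end_dt dt rest =
      some (((dt :: rest).dropWhile (fun x => decide (x < top_dt))).takeWhile (fun x => decide (x < end_dt))) := by
  induction rest generalizing dt with
  | nil =>
    unfold limit_dt_seq_skip
    by_cases h : dt < top_dt
    · simp [h]
    · simp [h, take_eq]
  | cons d r ih =>
    unfold limit_dt_seq_skip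
    by_cases h : dt < top_dt
    · simp only [if_pos h]
      rw [ih]
      simp [h]
    · simp [h, take_eq]

-- ===== VERDICT (by name: the statement is the Claim_ definition above) =====
theorem limit_dt_seq_spec : Claim_equal_limit_dt_seq := by
  intro l_dt top_dt end_dt _ hpre
  unfold Spec_limit_dt_seq
  match l_dt with
  | [] => exact absurd rfl hpre
  | dt :: rest =>
    rw [alt_eq_canon]
    show limit_dt_seq_skip top_dt end_dt dt rest = _
    rw [skip_eq]
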